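-- pv_equiv track=rewrite | github.com/yangdangfu/GeoHPEM_NEW | src/geohpem/units.py | available_units_for_kind
-- ===== SOURCE A (Python) =====
-- _UNIT_TO_SI: dict[str, tuple[str, float]] = {
--     # length
--     "m": ("length", 1.0),
--     "mm": ("length", 1e-3),
--     "cm": ("length", 1e-2),
--     "km": ("length", 1e3),
--     # force
--     "N": ("force", 1.0),
--     "kN": ("force", 1e3),
--     "MN": ("force", 1e6),
--     # time
--     "s": ("time", 1.0),
--     "min": ("time", 60.0),
--     "h": ("time", 3600.0),
--     # pressure
--     "Pa": ("pressure", 1.0),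
--     "kPa": ("pressure", 1e3),
--     "MPa": ("pressure", 1e6),
--     "GPa": ("pressure", 1e9),
-- }
--
-- def available_units_for_kind(kind: str) -> list[str]:
--     items: list[str] = []
--     for u, (k, _) in _UNIT_TO_SI.items():
--         if k == kind:
--             items.append(u)
--     # keep a stable, intuitive order
--     preferred: list[str] = []
--     for u in (
--         "mm",
--         "cm",
--         "m",
--         "km",
--         "Pa",
--         "kPa",
--         "MPa",
--         "GPa",
--         "N",
--         "kN",
--         "MN",
--         "s",
--         "min",
--         "h",
--     ):
--         if u in items:
--             preferred.append(u)
--     rest = sorted([u for u in items if u not in preferred])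
--     return preferred + rest
-- ===== SOURCE B (Python) =====
-- # B: the answer for each kind is a fixed list, so precompute a kind -> units
-- # table once and answer every query with a single dict lookup (no per-call
-- # iteration over units at all). Correct because _UNIT_TO_SI is a module
-- # constant: the ordered unit lists below are exactly what A produces for
-- # each of its four kinds, and A returns [] for any other kind.
-- _KIND_TO_UNITS: dict[str, list[str]] = {
--     "length": ["mm", "cm", "m", "km"],
--     "pressure": ["Pa", "kPa", "MPa", "GPa"],
--     "force": ["N", "kN", "MN"],
--     "time": ["s", "min", "h"],
-- }
--
-- def available_units_for_kind(kind: str) -> list[str]: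
--     return list(_KIND_TO_UNITS.get(kind, []))
-- ===== Notes on version B (the rewrite author's own statement) =====
-- stated objective: simpler
-- what changed: B replaces A's three per-call passes (collect matching dict keys, filter the ordered tuple by membership, sort-and-append the always-empty rest) with a single lookup in a precomputed kind-to-ordered-units table, defaulting to the empty list.
import Mathlib
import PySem

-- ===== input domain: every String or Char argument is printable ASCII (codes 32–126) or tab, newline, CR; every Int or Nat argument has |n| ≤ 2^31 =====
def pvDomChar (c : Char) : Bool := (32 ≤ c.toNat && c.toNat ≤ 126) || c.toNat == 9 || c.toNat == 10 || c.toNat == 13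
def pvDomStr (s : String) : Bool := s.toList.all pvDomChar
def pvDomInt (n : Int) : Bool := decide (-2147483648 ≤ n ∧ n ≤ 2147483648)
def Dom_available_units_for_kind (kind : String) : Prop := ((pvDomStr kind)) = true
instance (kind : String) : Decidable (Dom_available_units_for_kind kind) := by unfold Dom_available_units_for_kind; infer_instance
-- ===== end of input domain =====

-- B answers each query with one lookup in a precomputed kind -> ordered-units table
-- instead of A's collect / ordered-filter / sorted-rest passes; objective: simpler.

-- ===== PORT A =====
-- _UNIT_TO_SI: the float SI factor is never used by this function, so the dict is ported
-- keeping only the kind component of each value (exact for this function's behaviour).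
def pvUnitToSI : PySem.Dict String String :=
  PySem.Dict.mk [("m", "length"), ("mm", "length"), ("cm", "length"), ("km", "length"),
   ("N", "force"), ("kN", "force"), ("MN", "force"),
   ("s", "time"), ("min", "time"), ("h", "time"),
   ("Pa", "pressure"), ("kPa", "pressure"), ("MPa", "pressure"), ("GPa", "pressure")]

def pvOrderedA : List String :=
  ["mm", "cm", "m", "km", "Pa", "kPa", "MPa", "GPa", "N", "kN", "MN", "s", "min", "h"]

def available_units_for_kind (kind : String) : List String :=
  let items : List String :=
    pvUnitToSI.items.foldl (fun acc p => if p.2 == kind then acc ++ [p.1] else acc) []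
  let preferred : List String :=
    pvOrderedA.foldl (fun acc u => if items.contains u then acc ++ [u] else acc) []
  let rest : List String :=
    PySem.List.sorted (items.filter (fun u => ¬ preferred.contains u)) (fun x => x) false
  preferred ++ rest

-- ===== PORT B =====
def pvKindToUnits : PySem.Dict String (List String) :=
  PySem.Dict.mk [("length", ["mm", "cm", "m", "km"]),
   ("pressure", ["Pa", "kPa", "MPa", "GPa"]),
   ("force", ["N", "kN", "MN"]),
   ("time", ["s", "min", "h"])]

def available_units_for_kind_alt (kind : String) : List String :=
  (PySem.Dict.get? pvKindToUnits kind).getD []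

-- ===== PRECONDITION & SPEC =====
def Spec_available_units_for_kind (kind : String) (out : List String) : Prop := out = available_units_for_kind_alt kind
instance (kind : String) (out : List String) : Decidable (Spec_available_units_for_kind kind out) := by unfold Spec_available_units_for_kind; infer_instance

-- ===== CLAIM (what is proved, stated in full; the proofs are below) =====
def Claim_equal_available_units_for_kind : Prop := ∀ (kind : String), Dom_available_units_for_kind kind → Spec_available_units_for_kind kind (available_units_for_kind kind)

-- ===== LEMMAS AND PROOFS =====
theorem pv_generic (kind : String)
    (h1 : ("length" : String) ≠ kind) (h2 : ("force" : String) ≠ kind)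
    (h3 : ("time" : String) ≠ kind) (h4 : ("pressure" : String) ≠ kind) :
    available_units_for_kind kind = available_units_for_kind_alt kind := by
  have e1 : (("length" : String) == kind) = false := by simp [h1]
  have e2 : (("force" : String) == kind) = false := by simp [h2]
  have e3 : (("time" : String) == kind) = false := by simp [h3]
  have e4 : (("pressure" : String) == kind) = false := by simp [h4]
  simp [e1, e2, e3, e4, available_units_for_kind, available_units_for_kind_alt,
    pvUnitToSI, pvKindToUnits, pvOrderedA, PySem.Dict.get?, List.foldl, 
    h1, h2, h3, h4, PySem.List.sorted]

-- ===== VERDICT (by name: the statement is the Claim_ definition above) =====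
theorem available_units_for_kind_spec : Claim_equal_available_units_for_kind := by
  intro kind _
  show available_units_for_kind kind = available_units_for_kind_alt kind
  by_cases h1 : ("length" : String) = kind
  · subst h1; decide
  by_cases h2 : ("force" : String) = kind
  · subst h2; decide
  by_cases h3 : ("time" : String) = kind
  · subst h3; decide
  by_cases h4 : ("pressure" : String) = kind
  · subst h4; decide
  exact pv_generic kind h1 h2 h3 h4
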